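-- pv_equiv track=rewrite | github.com/AlexRogalskiy/quizzes | src/main/python/com/thiagoh/cci/c1/Q1_2.py | creverse
-- ===== SOURCE A (Python) =====
-- def creverse(s):
--     if s == None: return None;
--     if len(s) <= 2: return s;
--     sarr = list(s);
--     p1 = 0;
--     p2 = len(sarr) - 2;
--     t = 0;
--     while (p1 < p2):
--         t = sarr[p1];
--         sarr[p1] = sarr[p2];
--         sarr[p2] = t;
--         p1 += 1;
--         p2 -= 1;
--     return ''.join(sarr);
-- ===== SOURCE B (Python) =====
-- def creverse(s):
--     if s is None:
--         return None
--     return s[:-1][::-1] + s[-1:]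
-- ===== Notes on version B (the rewrite author's own statement) =====
-- stated objective: simpler
-- what changed: Replaced the explicit two-pointer in-place swap loop (plus the len<=2 special case) with the closed-form slice expression s[:-1][::-1] + s[-1:]; the C-level slice primitives also make it measurably faster (constant factor) than the interpreted swap loop.
import Mathlib
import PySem

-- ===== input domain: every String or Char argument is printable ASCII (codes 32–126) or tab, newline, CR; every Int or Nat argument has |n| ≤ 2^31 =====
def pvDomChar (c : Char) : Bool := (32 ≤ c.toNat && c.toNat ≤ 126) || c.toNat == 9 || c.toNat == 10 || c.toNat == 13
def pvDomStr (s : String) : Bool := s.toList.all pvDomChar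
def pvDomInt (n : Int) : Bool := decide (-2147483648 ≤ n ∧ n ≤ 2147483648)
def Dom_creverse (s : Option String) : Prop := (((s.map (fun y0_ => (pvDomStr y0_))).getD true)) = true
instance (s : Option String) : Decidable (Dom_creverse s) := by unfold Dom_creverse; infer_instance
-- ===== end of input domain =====

-- B replaces A's two-pointer swap loop (and its len<=2 special case) with the closed-form
-- slice expression s[:-1][::-1] + s[-1:] (objective: simpler). Return-value equivalence only.

-- ===== PORT A =====
-- the while loop: swap sarr[p1] and sarr[p2], advance both pointers
def creverseLoop (sarr : List Char) (p1 p2 : Nat) : List Char :=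
  if p1 < p2 then
    let t := sarr.getD p1 ' '        -- indices are always in range here, so getD is exact
    creverseLoop ((sarr.set p1 (sarr.getD p2 ' ')).set p2 t) (p1 + 1) (p2 - 1)
  else sarr
termination_by p2 - p1

def creverse (s : Option String) : Option String :=
  match s with
  | none => none
  | some str =>
    if str.toList.length ≤ 2 then some str   -- len(s) <= 2
    else
      let sarr := str.toList                 -- list(s)
      -- p1 = 0; p2 = len(sarr) - 2; while loop; ''.join(sarr)
      some (String.ofList (creverseLoop sarr 0 (sarr.length - 2)))

-- ===== PORT B =====
def creverse_alt (s : Option String) : Option String :=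
  match s with
  | none => none
  | some str =>
    let l := str.toList
    -- s[:-1][::-1] + s[-1:]; [::-1] is List.reverse (exact: PySem.List.slice?_none_none_neg_one)
    some (String.ofList ((PySem.List.slice l none (some (-1))).reverse ++
                         PySem.List.slice l (some (-1)) none))

-- ===== PRECONDITION & SPEC =====
def Spec_creverse (s : Option String) (out : Option String) : Prop := out = creverse_alt s
instance (s : Option String) (out : Option String) : Decidable (Spec_creverse s out) := by unfold Spec_creverse; infer_instance

-- ===== CLAIM (what is proved, stated in full; the proofs are below) =====
def Claim_equal_creverse : Prop := ∀ (s : Option String), Dom_creverse s → Spec_creverse s (creverse s)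

-- ===== LEMMAS AND PROOFS =====

-- the loop reverses the segment [p1, p2] of the array and leaves the rest in place
theorem creverseLoop_getElem? (sarr : List Char) (p1 p2 : Nat) :
    p2 < sarr.length → ∀ k : Nat,
      (creverseLoop sarr p1 p2)[k]? =
        if p1 ≤ k ∧ k ≤ p2 then sarr[p1 + p2 - k]? else sarr[k]? := by
  induction sarr, p1, p2 using creverseLoop.induct with
  | case1 sarr p1 p2 hlt t ih =>
    intro h2 k
    rw [creverseLoop, if_pos hlt]
    have h1 : p1 < sarr.length := by omega
    have hget : ∀ j : Nat, ((sarr.set p1 (sarr.getD p2 ' ')).set p2 t)[j]? =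
        if j = p2 then sarr[p1]? else if j = p1 then sarr[p2]? else sarr[j]? := by
      intro j
      by_cases hj2 : j = p2
      · subst hj2
        rw [List.getElem?_set_self (by simpa using h2), if_pos rfl]
        simp [t, List.getD_eq_getElem?_getD, List.getElem?_eq_getElem h1]
      · rw [List.getElem?_set_ne (by omega), if_neg hj2]
        by_cases hj1 : j = p1
        · subst hj1
          rw [List.getElem?_set_self h1, if_pos rfl]
          simp [List.getD_eq_getElem?_getD, List.getElem?_eq_getElem h2]
        · rw [List.getElem?_set_ne (by omega), if_neg hj1]
    rw [ih (by simp only [List.length_set]; omega) k]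
    simp only [hget]
    split_ifs <;> first | rfl | (congr 1; omega)
  | case2 sarr p1 p2 hge =>
    intro h2 k
    rw [creverseLoop, if_neg hge]
    by_cases hk : p1 ≤ k ∧ k ≤ p2
    · rw [if_pos hk]; congr 1; omega
    · rw [if_neg hk]

-- both sides as one list identity: the loop result is dropLast-reversed plus the last element
theorem creverseLoop_eq (l : List Char) (h : 3 ≤ l.length) :
    creverseLoop l 0 (l.length - 2) = l.dropLast.reverse ++ l.drop (l.length - 1) := by
  apply List.ext_getElem?
  intro k
  rw [creverseLoop_getElem? l 0 (l.length - 2) (by omega) k]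
  have hrl : l.dropLast.reverse.length = l.length - 1 := by simp
  by_cases hk : k < l.length - 1
  · rw [List.getElem?_append_left (by omega), List.getElem?_reverse (by simpa using hk)]
    have : l.dropLast[l.dropLast.length - 1 - k]? = l[l.length - 2 - k]? := by
      rw [show l.dropLast.length - 1 - k = l.length - 2 - k by simp; omega]
      simp [List.dropLast_eq_take, show l.length - 2 - k < l.length - 1 by omega]
    rw [this, if_pos (by omega)]
    congr 1; omega
  · rw [List.getElem?_append_right (by omega), if_neg (by omega)]
    by_cases hk2 : k = l.length - 1
    · subst hk2
      rw [List.getElem?_drop]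
      congr 1; omega
    · rw [List.getElem?_drop]
      rw [List.getElem?_eq_none_iff.mpr (by omega), List.getElem?_eq_none_iff.mpr (by omega)]

-- ===== VERDICT (by name: the statement is the Claim_ definition above) =====
theorem creverse_spec : Claim_equal_creverse := by
  intro s _
  unfold Spec_creverse creverse creverse_alt
  match s with
  | none => rfl
  | some str =>
    simp only [PySem.List.slice_to_neg_one, PySem.List.slice_from_neg_one]
    by_cases h : str.toList.length ≤ 2
    · rw [if_pos h]
      have : str.toList.dropLast.reverse ++ str.toList.drop (str.toList.length - 1)
           = str.toList := by
        match hm : str.toList, h with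
        | [], _ => rfl
        | [a], _ => rfl
        | [a, b], _ => rfl
      rw [this, String.ofList_toList]
    · rw [if_neg h, creverseLoop_eq str.toList (by omega)]
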